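-- pv_equiv track=rewrite | github.com/robotane/graph-theory-algos | fonctionsDeBase.py | adj_list_2_pred_list
-- ===== SOURCE A (Python) =====
-- def adj_list_2_pred_list(adj_list):
--     """
--     Convertis une liste d'adjacence en liste d'incidence et vice-versa
--
--     Parameters
--     ----------
--     adj_list : list
--         Une liste d'adjacence (resp une liste d'incidence).
--
--     Returns
--     -------
--     pred_list : list
--         Une liste d'incidence (resp une liste d'adjacence.)
--
--     """
--     pred_list = []
--     long = len(adj_list)
--
--     for s in range(long):
--         li = []
--         for t in range(long):
--             if s in adj_list[t]:
--                 li.append(t)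
--         pred_list.append(li)
--
--     # print_list(pred_list)
--
--     return pred_list
-- ===== SOURCE B (Python) =====
-- def adj_list_2_pred_list(adj_list):
--     n = len(adj_list)
--     pred_list = [[] for _ in range(n)]
--     for t, succs in enumerate(adj_list):
--         for s in succs:
--             if 0 <= s < n:
--                 row = pred_list[s]
--                 if not row or row[-1] != t:
--                     row.append(t)
--     return pred_list
-- ===== Notes on version B (the rewrite author's own statement) =====
-- stated objective: faster
-- what changed: Instead of scanning every adjacency row for every node s (nested loops over range(n)), B makes a single pass over the rows, appending each source t to the predecessor row of each of its in-range successors, with a last-element check to collapse duplicate successors.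
import Mathlib
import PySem

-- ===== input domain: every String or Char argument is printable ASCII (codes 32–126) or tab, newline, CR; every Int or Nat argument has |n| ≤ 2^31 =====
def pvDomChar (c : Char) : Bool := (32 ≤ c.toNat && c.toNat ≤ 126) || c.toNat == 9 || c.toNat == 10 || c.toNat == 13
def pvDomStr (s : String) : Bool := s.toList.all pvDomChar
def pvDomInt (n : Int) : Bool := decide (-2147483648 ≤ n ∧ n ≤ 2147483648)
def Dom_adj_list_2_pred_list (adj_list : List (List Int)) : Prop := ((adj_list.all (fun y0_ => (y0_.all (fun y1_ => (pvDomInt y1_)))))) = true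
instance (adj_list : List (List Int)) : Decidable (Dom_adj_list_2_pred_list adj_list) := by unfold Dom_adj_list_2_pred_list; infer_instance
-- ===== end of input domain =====

-- B replaces A's quadratic "for each node s, scan every adjacency row" with a single pass over the
-- rows, appending each source t to the row of each of its successors (objective: faster).

-- ===== PORT A =====
def adj_list_2_pred_list (adj_list : List (List Int)) : List (List Int) :=
  let long : Int := adj_list.length
  (PySem.List.pyRange 0 long 1).foldl (fun pred_list s =>
    pred_list ++ [(PySem.List.pyRange 0 long 1).foldl (fun li t =>
      if s ∈ PySem.List.pyGetD adj_list t [] then li ++ [t] else li) []]) []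

-- ===== PORT B =====
-- one body of B's inner loop: "if 0 <= s < n: row = pred_list[s]; if not row or row[-1] != t: row.append(t)"
def pvBStep (n : Int) (t : Int) (pred : List (List Int)) (s : Int) : List (List Int) :=
  if 0 ≤ s ∧ s < n then
    if PySem.List.pyGetD pred s [] = [] ∨ (PySem.List.pyGetD pred s []).getLast? ≠ some t then
      pred.set s.toNat (PySem.List.pyGetD pred s [] ++ [t])
    else pred
  else pred

def adj_list_2_pred_list_alt (adj_list : List (List Int)) : List (List Int) :=
  let n : Int := adj_list.length
  (PySem.List.enumerate adj_list).foldl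
    (fun pred p => p.2.foldl (pvBStep n p.1) pred)
    (List.replicate adj_list.length [])

-- ===== PRECONDITION & SPEC =====
def Spec_adj_list_2_pred_list (adj_list : List (List Int)) (out : List (List Int)) : Prop := out = adj_list_2_pred_list_alt adj_list
instance (adj_list : List (List Int)) (out : List (List Int)) : Decidable (Spec_adj_list_2_pred_list adj_list out) := by unfold Spec_adj_list_2_pred_list; infer_instance

-- ===== CLAIM (what is proved, stated in full; the proofs are below) =====
def Claim_equal_adj_list_2_pred_list : Prop := ∀ (adj_list : List (List Int)), Dom_adj_list_2_pred_list adj_list → Spec_adj_list_2_pred_list adj_list (adj_list_2_pred_list adj_list)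

-- ===== LEMMAS AND PROOFS =====

-- the predecessors of node s among sources 0..k-1
def pvRow (adj : List (List Int)) (s k : Nat) : List Int :=
  ((List.range k).filter (fun t => decide (((s : Nat) : Int) ∈ adj.getD t []))).map
    (fun t => ((t : Nat) : Int))

theorem pvRow_succ (adj : List (List Int)) (s k : Nat) :
    pvRow adj s (k + 1) =
      pvRow adj s k ++ (if ((s : Nat) : Int) ∈ adj.getD k [] then [((k : Nat) : Int)] else []) := by
  simp [pvRow, List.range_succ, List.filter_append]
  split_ifs <;> simp_all

theorem pvRow_mem_lt (adj : List (List Int)) (s k : Nat) (x : Int) (hx : x ∈ pvRow adj s k) :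
    x < (k : Nat) := by
  simp [pvRow] at hx
  obtain ⟨t, ⟨ht, _⟩, rfl⟩ := hx
  exact_mod_cast ht

theorem pvRow_not_mem (adj : List (List Int)) (s k : Nat) : ((k : Nat) : Int) ∉ pvRow adj s k := by
  intro h
  have := pvRow_mem_lt adj s k _ h
  omega

theorem pvRow_stable (adj : List (List Int)) (s k : Nat) (hk : adj.length ≤ k) :
    pvRow adj s k = pvRow adj s adj.length := by
  induction k with
  | zero => have : adj.length = 0 := by omega
            rw [this]
  | succ k ih =>
    rcases Nat.lt_or_ge adj.length (k + 1) with h | h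
    · have hk' : adj.length ≤ k := by omega
      rw [pvRow_succ, ih hk', List.getD_eq_default _ _ hk']
      simp
    · have : adj.length = k + 1 := by omega
      rw [this]

theorem pv_self_map_range {α : Type} (d : α) (l : List α) :
    l = (List.range l.length).map (fun s => l.getD s d) := by
  apply List.ext_getElem
  · simp
  · intro i h1 h2
    simp [List.getD_eq_getElem?_getD, List.getElem?_eq_getElem h1]

theorem pv_getD_map_range {α : Type} (d : α) (f : Nat → α) (n s : Nat) (hs : s < n) :
    ((List.range n).map f).getD s d = f s := by
  rw [List.getD_eq_getElem _ _ (by simpa using hs)]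
  simp

-- one round of B's inner loop, characterized elementwise
theorem pv_inner (t : Int) (L : List Int) :
    ∀ (pred : List (List Int)),
      (∀ r ∈ pred, (∀ x ∈ r, x ≤ t) ∧ (t ∈ r → r.getLast? = some t)) →
      L.foldl (pvBStep (pred.length : Int) t) pred =
        (List.range pred.length).map (fun s =>
          if ((s : Nat) : Int) ∈ L ∧ t ∉ pred.getD s [] then pred.getD s [] ++ [t]
          else pred.getD s []) := by
  induction L with
  | nil =>
    intro pred _
    simpa using pv_self_map_range [] pred
  | cons s0 L ih =>
    intro pred hC
    rw [List.foldl_cons]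
    by_cases hb : 0 ≤ s0 ∧ s0 < (pred.length : Int)
    · -- in bounds: s0 = (j : Int) with j < pred.length
      set j : Nat := s0.toNat with hj
      have hjs : ((j : Nat) : Int) = s0 := Int.toNat_of_nonneg hb.1
      have hjlt : j < pred.length := by omega
      have hrow : PySem.List.pyGetD pred s0 [] = pred.getD j [] := by
        rw [← hjs, PySem.List.pyGetD_natCast]
      have hrowmem : pred.getD j [] ∈ pred := by
        rw [List.getD_eq_getElem _ _ hjlt]; exact List.getElem_mem hjlt
      by_cases ht : t ∈ pred.getD j []
      · -- already appended this round: guard blocks the append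
        have hlast : (pred.getD j []).getLast? = some t := (hC _ hrowmem).2 ht
        have hne : pred.getD j [] ≠ [] := by rintro h; rw [h] at ht; simp at ht
        have hguardF : ¬(pred.getD j [] = [] ∨ (pred.getD j []).getLast? ≠ some t) := by
          exact not_or.mpr ⟨hne, not_not.mpr hlast⟩
        have hstep : pvBStep (pred.length : Int) t pred s0 = pred := by
          unfold pvBStep
          rw [if_pos hb, hrow, if_neg hguardF]
        rw [hstep, ih pred hC]
        apply List.map_congr_left
        intro s hs
        rw [List.mem_range] at hs
        by_cases hsj : s = j
        · subst hsj
          have ht2 : t ∈ pred[j]?.getD [] := by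
            rw [← List.getD_eq_getElem?_getD]; exact ht
          simp [List.mem_cons, ht2]
        · have : ((s : Nat) : Int) ≠ s0 := by rw [← hjs]; intro h; exact hsj (by exact_mod_cast h)
          simp [List.mem_cons, this]
      · -- first occurrence this round: append t to row j
        have hguard : pred.getD j [] = [] ∨ (pred.getD j []).getLast? ≠ some t := by
          rcases eq_or_ne (pred.getD j []) [] with h | h
          · exact Or.inl h
          · refine Or.inr fun hl => ht ?_
            exact List.mem_of_getLast? hl
        have hstep : pvBStep (pred.length : Int) t pred s0 =
            pred.set j (pred.getD j [] ++ [t]) := by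
          unfold pvBStep
          rw [if_pos hb, hrow, if_pos hguard, hj]
        set pred' := pred.set j (pred.getD j [] ++ [t]) with hpred'
        have hlen' : pred'.length = pred.length := by simp [hpred']
        have hC' : ∀ r ∈ pred', (∀ x ∈ r, x ≤ t) ∧ (t ∈ r → r.getLast? = some t) := by
          intro r hr
          rcases List.mem_or_eq_of_mem_set hr with h | h
          · exact hC r h
          · subst h
            constructor
            · intro x hx
              rcases List.mem_append.mp hx with h | h
              · exact (hC _ hrowmem).1 x h
              · simp at h; omega
            · intro _; exact List.getLast?_concat
        have hgd : ∀ s : Nat, s < pred.length →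
            pred'.getD s [] = if s = j then pred.getD j [] ++ [t] else pred.getD s [] := by
          intro s hs
          simp only [hpred', List.getD_eq_getElem?_getD, List.getElem?_set]
          by_cases hsj : s = j
          · subst hsj; simp [hjlt]
          · simp [Ne.symm hsj, hsj]
        rw [hstep]
        have := ih pred' hC'
        rw [hlen'] at this
        rw [this]
        apply List.map_congr_left
        intro s hs
        rw [List.mem_range] at hs
        by_cases hsj : s = j
        · subst hsj
          rw [hgd _ hs]
          have ht2 : t ∉ pred[j]?.getD [] := by
            rw [← List.getD_eq_getElem?_getD]; exact ht
          simp [List.mem_cons, hjs, ht2]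
        · have hne : ((s : Nat) : Int) ≠ s0 := by rw [← hjs]; intro h; exact hsj (by exact_mod_cast h)
          rw [hgd _ hs]
          simp [List.mem_cons, hne, hsj]
    · -- out of bounds: nothing happens, and (s:Int) ∈ s0 :: L ↔ (s:Int) ∈ L for all valid s
      have hstep : pvBStep (pred.length : Int) t pred s0 = pred := by
        simp [pvBStep, hb]
      rw [hstep, ih pred hC]
      apply List.map_congr_left
      intro s hs
      rw [List.mem_range] at hs
      have : ((s : Nat) : Int) ≠ s0 := by
        intro h
        apply hb
        constructor <;> omega
      simp [List.mem_cons, this]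

theorem pv_outer (adj : List (List Int)) :
    ∀ (rest : List (List Int)) (k : Nat) (pred : List (List Int)),
      rest = adj.drop k →
      pred.length = adj.length →
      (∀ s, s < adj.length → pred.getD s [] = pvRow adj s k) →
      ((PySem.List.enumerate rest (k : Int)).foldl
          (fun pr p => p.2.foldl (pvBStep (adj.length : Int) p.1) pr) pred) =
        (List.range adj.length).map (fun s => pvRow adj s adj.length) := by
  intro rest
  induction rest with
  | nil =>
    intro k pred hrest hlen h3
    have hk : adj.length ≤ k := by
      by_contra h
      have := congrArg List.length hrest
      simp [List.length_drop] at this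
      omega
    rw [PySem.List.enumerate_nil, List.foldl_nil]
    rw [pv_self_map_range [] pred, hlen]
    apply List.map_congr_left
    intro s hs
    rw [List.mem_range] at hs
    rw [h3 s hs, pvRow_stable adj s k hk]
  | cons hd tl ih =>
    intro k pred hrest hlen h3
    have hklt : k < adj.length := by
      by_contra h
      rw [List.drop_eq_nil_of_le (by omega)] at hrest
      simp at hrest
    have hdrop : adj.drop k = adj[k] :: adj.drop (k + 1) := List.drop_eq_getElem_cons hklt
    rw [hdrop] at hrest
    have hhd : hd = adj[k] := (List.cons.injEq _ _ _ _ ▸ hrest).1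
    have htl : tl = adj.drop (k + 1) := (List.cons.injEq _ _ _ _ ▸ hrest).2
    rw [PySem.List.enumerate_cons, List.foldl_cons]
    have hC : ∀ r ∈ pred, (∀ x ∈ r, x ≤ ((k : Nat) : Int)) ∧
        (((k : Nat) : Int) ∈ r → r.getLast? = some ((k : Nat) : Int)) := by
      intro r hr
      obtain ⟨i, hi, rfl⟩ := List.getElem_of_mem hr
      have : pred[i] = pvRow adj i k := by
        rw [← List.getD_eq_getElem _ _ hi, h3 i (by omega)]
      rw [this]
      constructor
      · intro x hx
        have := pvRow_mem_lt adj i k x hx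
        omega
      · intro h
        exact absurd h (pvRow_not_mem adj i k)
    have hinner := pv_inner ((k : Nat) : Int) hd pred hC
    rw [hlen] at hinner
    rw [hinner]
    set pred' := (List.range adj.length).map (fun s =>
        if ((s : Nat) : Int) ∈ hd ∧ ((k : Nat) : Int) ∉ pred.getD s [] then pred.getD s [] ++ [((k : Nat) : Int)]
        else pred.getD s []) with hpred'
    have hlen' : pred'.length = adj.length := by simp [hpred']
    have h3' : ∀ s, s < adj.length → pred'.getD s [] = pvRow adj s (k + 1) := by
      intro s hs
      rw [hpred', pv_getD_map_range _ _ _ _ hs]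
      rw [h3 s hs, pvRow_succ, hhd]
      have hga : adj.getD k [] = adj[k] := List.getD_eq_getElem _ _ hklt
      rw [hga]
      by_cases hmem : ((s : Nat) : Int) ∈ adj[k]
      · rw [if_pos ⟨hmem, pvRow_not_mem adj s k⟩, if_pos hmem]
      · rw [if_neg (fun h => hmem h.1), if_neg hmem, List.append_nil]
    have hcast : (k : Int) + 1 = ((k + 1 : Nat) : Int) := by push_cast; ring
    rw [hcast]
    exact ih (k + 1) pred' htl hlen' h3'

theorem pvA_char (adj : List (List Int)) :
    adj_list_2_pred_list adj = (List.range adj.length).map (fun s => pvRow adj s adj.length) := by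
  unfold adj_list_2_pred_list
  rw [PySem.List.foldl_append_singleton_eq_map]
  rw [PySem.List.pyRange_zero_nat]
  rw [List.map_map]
  apply List.map_congr_left
  intro s _
  simp only [Function.comp_apply]
  rw [PySem.List.foldl_append_ite_eq_filter, List.filter_map]
  simp [pvRow, Function.comp_def]

theorem pvB_char (adj : List (List Int)) :
    adj_list_2_pred_list_alt adj = (List.range adj.length).map (fun s => pvRow adj s adj.length) := by
  have h0 : ((0 : Nat) : Int) = (0 : Int) := rfl
  have := pv_outer adj adj 0 (List.replicate adj.length [])
      (by simp) (by simp)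
      (by intro s hs
          rw [List.getD_eq_getElem _ _ (by simpa using hs)]
          simp [pvRow])
  rw [h0] at this
  simpa [adj_list_2_pred_list_alt] using this

-- ===== VERDICT (by name: the statement is the Claim_ definition above) =====
theorem adj_list_2_pred_list_spec : Claim_equal_adj_list_2_pred_list := by
  intro adj _
  unfold Spec_adj_list_2_pred_list
  rw [pvA_char, pvB_char]
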